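-- pv_equiv track=rewrite | github.com/ethanfussell/lego-app | backend/app/routers/themes.py | _set_count_by_theme
-- ===== SOURCE A (Python) =====
-- import unicodedata
-- from typing import Any, Dict, List, Optional, Tuple
--
-- def _strip_diacritics(s: str) -> str:
--     """Remove diacritical marks: é → e, ü → u, etc."""
--     return "".join(
--         c for c in unicodedata.normalize("NFD", s)
--         if unicodedata.category(c) != "Mn"
--     )
--
-- def _norm(s: str) -> str:
--     return (s or "").strip()
--
-- def _norm_lower(s: str) -> str:
--     return _strip_diacritics(_norm(s)).lower()
--
-- def _theme_key(theme: str) -> str: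
--     # stable key for comparisons / grouping (accent-insensitive)
--     return _norm_lower(theme)
--
-- def _set_count_by_theme(
--     all_sets: List[Dict[str, Any]],
--     q: str,
--     min_year: Optional[int] = None,
-- ) -> List[Tuple[str, int, Optional[str]]]:
--     """Returns list of (display_theme, set_count, image_url)."""
--     ql = _norm_lower(q)
--     counts: Dict[str, int] = {}
--     display: Dict[str, str] = {}
--     # Track the best image per theme: pick the set with the most pieces
--     best_image: Dict[str, Tuple[int, Optional[str]]] = {}  # key -> (pieces, url)
--
--     for s in all_sets:
--         theme = _norm(str(s.get("theme") or ""))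
--         if not theme:
--             continue
--
--         if min_year is not None:
--             try:
--                 if int(s.get("year") or 0) < min_year:
--                     continue
--             except (ValueError, TypeError):
--                 continue
--
--         k = _theme_key(theme)
--         if ql and ql not in k:
--             continue
--
--         counts[k] = counts.get(k, 0) + 1
--         display.setdefault(k, theme)
--
--         img = s.get("image_url") or None
--         if img:
--             pieces = int(s.get("pieces") or 0)
--             prev = best_image.get(k)
--             if prev is None or pieces > prev[0]:
--                 best_image[k] = (pieces, img)
--
--     rows = [
--         (display[k], counts[k], (best_image.get(k) or (0, None))[1])
--         for k in counts.keys()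
--     ]
--     rows.sort(key=lambda t: t[0].lower())
--     return rows
-- ===== SOURCE B (Python) =====
-- import unicodedata
--
--
-- def _strip_diacritics(s: str) -> str:
--     return "".join(
--         c for c in unicodedata.normalize("NFD", s)
--         if unicodedata.category(c) != "Mn"
--     )
--
--
-- def _norm(s: str) -> str:
--     return (s or "").strip()
--
--
-- def _norm_lower(s: str) -> str:
--     return _strip_diacritics(_norm(s)).lower()
--
--
-- def _theme_key(theme: str) -> str:
--     return _norm_lower(theme)
--
--
-- def _set_count_by_theme(all_sets, q, min_year=None):
--     """Group-then-aggregate: one grouping pass, then per-group len() and max()."""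
--     ql = _norm_lower(q)
--     groups = {}  # theme_key -> (display_theme, [sets in input order])
--     for s in all_sets:
--         theme = _norm(str(s.get("theme") or ""))
--         if not theme:
--             continue
--         if min_year is not None:
--             try:
--                 if int(s.get("year") or 0) < min_year:
--                     continue
--             except (ValueError, TypeError):
--                 continue
--         k = _theme_key(theme)
--         if ql and ql not in k:
--             continue
--         groups.setdefault(k, (theme, []))[1].append(s)
--     rows = []
--     for disp, members in groups.values():
--         best = max((s for s in members if s.get("image_url")),
--                    key=lambda s: int(s.get("pieces") or 0), default=None)
--         rows.append((disp, len(members),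
--                      best.get("image_url") if best is not None else None))
--     rows.sort(key=lambda t: t[0].lower())
--     return rows
-- ===== Notes on version B (the rewrite author's own statement) =====
-- stated objective: alternative
-- what changed: A maintains three parallel running dicts (count, display name, best-image-so-far with a strict-> update) in one loop; B does one grouping pass into theme_key -> (display, member list) and then computes each row's count with len() and its best image with a single max(..., key=pieces, default=None) over the group.
import Mathlib
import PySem

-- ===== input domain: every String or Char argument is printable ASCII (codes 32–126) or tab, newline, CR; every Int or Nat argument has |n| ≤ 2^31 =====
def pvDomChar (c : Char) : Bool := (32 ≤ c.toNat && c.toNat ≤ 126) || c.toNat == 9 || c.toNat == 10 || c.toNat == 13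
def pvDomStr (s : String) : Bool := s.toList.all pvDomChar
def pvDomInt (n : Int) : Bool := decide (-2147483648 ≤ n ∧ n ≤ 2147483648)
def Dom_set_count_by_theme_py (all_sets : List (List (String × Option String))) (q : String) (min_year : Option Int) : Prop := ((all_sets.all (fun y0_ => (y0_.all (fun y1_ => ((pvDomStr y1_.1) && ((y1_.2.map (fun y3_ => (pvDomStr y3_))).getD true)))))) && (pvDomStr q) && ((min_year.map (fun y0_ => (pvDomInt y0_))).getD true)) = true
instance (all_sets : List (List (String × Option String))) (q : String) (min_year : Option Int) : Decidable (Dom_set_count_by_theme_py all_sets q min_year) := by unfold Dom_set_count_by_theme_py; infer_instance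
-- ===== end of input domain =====

-- B replaces A's three parallel running dicts (count / display / best-image) by one grouping pass
-- (theme_key -> members) followed by per-group len() and max(); alternative decomposition, same cost.


-- ===== PORT A =====
-- s.get(k): first match in the association list, a stored None and a missing key both give none
def pvGet (s : List (String × Option String)) (k : String) : Option String :=
  (PySem.Dict.mk s).get? k |>.join

-- _norm_lower: _strip_diacritics is the identity on the printable-ASCII domain (NFD is a no-op there), so strip + lower
def pvNormLower (s : String) : String := PySem.Str.lower (PySem.Str.strip s)

-- int(v or 0) for v : Optional[str]; none = ValueError
def pvIntOr0 (v : Option String) : Option Int :=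
  match v with
  | none => some 0
  | some t => if t == "" then some 0 else PySem.Int.ofStr? t

-- Python truthiness of an Optional[str]
def pvTruthy (v : Option String) : Bool :=
  match v with
  | none => false
  | some t => !(t == "")

def set_count_by_theme_py (all_sets : List (List (String × Option String))) (q : String) (min_year : Option Int) : List (String × Int × Option String) :=
  let ql := pvNormLower q
  let st := all_sets.foldl
    (fun (st : PySem.Dict String Int × PySem.Dict String String × PySem.Dict String (Int × String)) s =>
      let theme := PySem.Str.strip ((pvGet s "theme").getD "")
      if theme == "" then st
      else
        let yearOk := match min_year with
          | none => true
          | some m => match pvIntOr0 (pvGet s "year") with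
            | none => false            -- ValueError/TypeError: continue
            | some y => !decide (y < m)
        if !yearOk then st
        else
          let k := pvNormLower theme   -- _theme_key(theme) = _norm_lower(theme); theme already stripped
          if ql != "" && !(PySem.Str.isIn ql k) then st
          else
            let counts' := st.1.insert k (st.1.getD k 0 + 1)
            let display' := st.2.1.setdefault k theme
            let img := pvGet s "image_url"
            if pvTruthy img then
              -- pieces = int(s.get("pieces") or 0): Python raises ValueError where pvIntOr0 is none;
              -- those inputs are excluded by Pre_, the .getD 0 is never reached inside Pre_
              let pieces := (pvIntOr0 (pvGet s "pieces")).getD 0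
              let best' := match st.2.2.get? k with
                | none => st.2.2.insert k (pieces, img.getD "")
                | some prev => if prev.1 < pieces then st.2.2.insert k (pieces, img.getD "") else st.2.2
              (counts', display', best')
            else (counts', display', st.2.2))
    (PySem.Dict.empty, PySem.Dict.empty, PySem.Dict.empty)
  let rows := st.1.keys.map (fun k => (st.2.1.getD k "", st.1.getD k 0, (st.2.2.get? k).map (·.2)))
  PySem.List.sorted rows (fun t => PySem.Str.lower t.1) false

-- ===== PORT B =====
def set_count_by_theme_py_alt (all_sets : List (List (String × Option String))) (q : String) (min_year : Option Int) : List (String × Int × Option String) :=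
  let ql := pvNormLower q
  let groups := all_sets.foldl
    (fun (g : PySem.Dict String (String × List (List (String × Option String)))) s =>
      let theme := PySem.Str.strip ((pvGet s "theme").getD "")
      if theme == "" then g
      else
        let yearOk := match min_year with
          | none => true
          | some m => match pvIntOr0 (pvGet s "year") with
            | none => false
            | some y => !decide (y < m)
        if !yearOk then g
        else
          let k := pvNormLower theme
          if ql != "" && !(PySem.Str.isIn ql k) then g
          else
            -- groups.setdefault(k, (theme, []))[1].append(s)
            g.modify k (theme, []) (fun p => (p.1, p.2 ++ [s])))
    PySem.Dict.empty
  let rows := groups.items.map (fun kv =>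
    -- best = max((s for s in members if s.get("image_url")), key=..., default=None)
    let best := PySem.List.max? (kv.2.2.filter (fun s => pvTruthy (pvGet s "image_url")))
      (fun s => (pvIntOr0 (pvGet s "pieces")).getD 0)
    (kv.2.1, (kv.2.2.length : Int),
      match best with
      | some b => pvGet b "image_url"
      | none => none))
  PySem.List.sorted rows (fun t => PySem.Str.lower t.1) false

-- ===== PRECONDITION & SPEC =====
-- the filter pipeline of the loop, per element (same tests A applies before touching "pieces")
def pvKeep (s : List (String × Option String)) (ql : String) (min_year : Option Int) : Bool :=
  let theme := PySem.Str.strip ((pvGet s "theme").getD "")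
  !(theme == "") &&
  (match min_year with
    | none => true
    | some m => match pvIntOr0 (pvGet s "year") with
      | none => false
      | some y => !decide (y < m)) &&
  !(ql != "" && !(PySem.Str.isIn ql (pvNormLower theme)))

-- Pre_ excludes exactly the inputs on which Python A raises ValueError: a set that passes all filters,
-- has a truthy image_url and a non-int-parsable "pieces" string (B raises there too).
def Pre_set_count_by_theme_py (all_sets : List (List (String × Option String))) (q : String) (min_year : Option Int) : Prop :=
  ∀ s ∈ all_sets, pvKeep s (pvNormLower q) min_year = true →
    pvTruthy (pvGet s "image_url") = true → pvIntOr0 (pvGet s "pieces") ≠ none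
instance (all_sets : List (List (String × Option String))) (q : String) (min_year : Option Int) : Decidable (Pre_set_count_by_theme_py all_sets q min_year) := by unfold Pre_set_count_by_theme_py; infer_instance

def pvWitness_set_count_by_theme_py : (List (List (String × Option String))) × String × Option Int :=
  ([[("theme", some "Star Wars"), ("year", some "2001"), ("pieces", some "100"), ("image_url", some "u")],
    [("theme", some "City"), ("pieces", none)]], "", some 2000)

def Spec_set_count_by_theme_py (all_sets : List (List (String × Option String))) (q : String) (min_year : Option Int) (out : List (String × Int × Option String)) : Prop := out = set_count_by_theme_py_alt all_sets q min_year
instance (all_sets : List (List (String × Option String))) (q : String) (min_year : Option Int) (out : List (String × Int × Option String)) : Decidable (Spec_set_count_by_theme_py all_sets q min_year out) := by unfold Spec_set_count_by_theme_py; infer_instance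

-- ===== CLAIM (what is proved, stated in full; the proofs are below) =====
def Claim_equal_set_count_by_theme_py : Prop := ∀ (all_sets : List (List (String × Option String))) (q : String) (min_year : Option Int), Dom_set_count_by_theme_py all_sets q min_year → Pre_set_count_by_theme_py all_sets q min_year → Spec_set_count_by_theme_py all_sets q min_year (set_count_by_theme_py all_sets q min_year)

-- ===== LEMMAS AND PROOFS =====


abbrev pvSetT : Type := List (String × Option String)
abbrev pvStA : Type := PySem.Dict String Int × PySem.Dict String String × PySem.Dict String (Int × String)
abbrev pvG : Type := PySem.Dict String (String × List pvSetT)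

def pvTheme (s : pvSetT) : String := PySem.Str.strip ((pvGet s "theme").getD "")
def pvKey (s : pvSetT) : String := pvNormLower (pvTheme s)
def pvPieces (s : pvSetT) : Int := (pvIntOr0 (pvGet s "pieces")).getD 0
def pvImgOk (s : pvSetT) : Bool := pvTruthy (pvGet s "image_url")
def pvImgV (s : pvSetT) : String := (pvGet s "image_url").getD ""

def pvBestUpd (bd : PySem.Dict String (Int × String)) (k : String) (s : pvSetT) : PySem.Dict String (Int × String) :=
  if pvImgOk s then
    match bd.get? k with
    | none => bd.insert k (pvPieces s, pvImgV s)
    | some prev => if prev.1 < pvPieces s then bd.insert k (pvPieces s, pvImgV s) else bd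
  else bd

def pvStepA (st : pvStA) (s : pvSetT) : pvStA :=
  (st.1.insert (pvKey s) (st.1.getD (pvKey s) 0 + 1),
   st.2.1.setdefault (pvKey s) (pvTheme s),
   pvBestUpd st.2.2 (pvKey s) s)

def pvStepB (g : pvG) (s : pvSetT) : pvG :=
  g.modify (pvKey s) (pvTheme s, []) (fun p => (p.1, p.2 ++ [s]))

def pvBStep (prev : Option (Int × String)) (s : pvSetT) : Option (Int × String) :=
  if pvImgOk s then
    match prev with
    | none => some (pvPieces s, pvImgV s)
    | some p => if p.1 < pvPieces s then some (pvPieces s, pvImgV s) else prev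
  else prev

def pvBest (ms : List pvSetT) : Option (Int × String) := ms.foldl pvBStep none

def pvInv (st : pvStA) (g : pvG) : Prop :=
  g.keys.Nodup ∧
  st.1.items = g.items.map (fun kv => (kv.1, (kv.2.2.length : Int))) ∧
  st.2.1.items = g.items.map (fun kv => (kv.1, kv.2.1)) ∧
  ∀ k, st.2.2.get? k = pvBest (((g.get? k).map (·.2)).getD [])

theorem pv_corr {β : Type} (d : PySem.Dict String β) (g : pvG) (F : String × List pvSetT → β)
    (h : d.items = g.items.map (fun kv => (kv.1, F kv.2))) (j : String) :
    d.get? j = (g.get? j).map F := by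
  simp only [PySem.Dict.get?, h, List.find?_map]
  have : ((fun p : String × β => p.1 == j) ∘ (fun kv : String × (String × List pvSetT) => (kv.1, F kv.2)))
       = fun kv => kv.1 == j := by funext kv; rfl
  rw [this]
  cases g.items.find? (fun kv => kv.1 == j) <;> rfl

theorem pv_contains_corr {β : Type} (d : PySem.Dict String β) (g : pvG) (F : String × List pvSetT → β)
    (h : d.items = g.items.map (fun kv => (kv.1, F kv.2))) (j : String) :
    d.contains j = g.contains j := by
  rw [PySem.Dict.contains_eq_isSome_get?, PySem.Dict.contains_eq_isSome_get?, pv_corr d g F h]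
  cases g.get? j <;> rfl

theorem pvStepA_fst (st : pvStA) (s : pvSetT) :
    (pvStepA st s).1 = st.1.insert (pvKey s) (st.1.getD (pvKey s) 0 + 1) := rfl
theorem pvStepA_disp (st : pvStA) (s : pvSetT) :
    (pvStepA st s).2.1 = st.2.1.setdefault (pvKey s) (pvTheme s) := rfl
theorem pvStepA_best (st : pvStA) (s : pvSetT) :
    (pvStepA st s).2.2 = pvBestUpd st.2.2 (pvKey s) s := rfl
theorem pvStepB_eq (g : pvG) (s : pvSetT) :
    pvStepB g s = g.insert (pvKey s)
      ((g.getD (pvKey s) (pvTheme s, [])).1, (g.getD (pvKey s) (pvTheme s, [])).2 ++ [s]) := rfl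

theorem pvBestUpd_get?_ne (bd : PySem.Dict String (Int × String)) (k j : String) (s : pvSetT)
    (hj : j ≠ k) : (pvBestUpd bd k s).get? j = bd.get? j := by
  unfold pvBestUpd
  by_cases himg : pvImgOk s = true
  · simp only [himg, if_true]
    cases hprev : bd.get? k
    · exact PySem.Dict.get?_insert_of_ne _ _ hj
    · rename_i p
      show (if p.1 < pvPieces s then bd.insert k (pvPieces s, pvImgV s) else bd).get? j = bd.get? j
      by_cases hlt : p.1 < pvPieces s
      · rw [if_pos hlt]; exact PySem.Dict.get?_insert_of_ne _ _ hj
      · rw [if_neg hlt]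
  · simp only [himg]
    rfl

theorem pvBestUpd_get?_self (bd : PySem.Dict String (Int × String)) (k : String) (s : pvSetT) :
    (pvBestUpd bd k s).get? k = pvBStep (bd.get? k) s := by
  unfold pvBestUpd pvBStep
  by_cases himg : pvImgOk s = true
  · simp only [himg, if_true]
    cases hprev : bd.get? k
    · exact PySem.Dict.get?_insert_self _ _ _
    · rename_i p
      show (if p.1 < pvPieces s then bd.insert k (pvPieces s, pvImgV s) else bd).get? k
        = if p.1 < pvPieces s then some (pvPieces s, pvImgV s) else some p
      by_cases hlt : p.1 < pvPieces s
      · rw [if_pos hlt, if_pos hlt]; exact PySem.Dict.get?_insert_self _ _ _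
      · rw [if_neg hlt, if_neg hlt]; exact hprev
  · simp only [himg]
    rfl

set_option maxHeartbeats 1000000 in
theorem pvInv_step (st : pvStA) (g : pvG) (s : pvSetT) (h : pvInv st g) :
    pvInv (pvStepA st s) (pvStepB g s) := by
  obtain ⟨hnd, hc, hd, hb⟩ := h
  obtain ⟨k, hk⟩ : ∃ x, pvKey s = x := ⟨_, rfl⟩
  have hcorrC := pv_corr st.1 g (fun v => (v.2.length : Int)) hc
  have hcorrD := pv_corr st.2.1 g (fun v => v.1) hd
  have hcontC := pv_contains_corr st.1 g (fun v => (v.2.length : Int)) hc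
  have hcontD := pv_contains_corr st.2.1 g (fun v => v.1) hd
  have hstepB : pvStepB g s
      = g.insert k ((g.getD k (pvTheme s, [])).1, (g.getD k (pvTheme s, [])).2 ++ [s]) := by
    rw [pvStepB_eq, hk]
  by_cases hgk : g.contains k = true
  · -- key already present
    obtain ⟨v, hv⟩ : ∃ v, g.get? k = some v := by
      rw [PySem.Dict.contains_eq_isSome_get?] at hgk
      cases hg : g.get? k
      · rw [hg] at hgk; simp at hgk
      · exact ⟨_, rfl⟩
    have hgetD : g.getD k (pvTheme s, []) = v := PySem.Dict.getD_of_get?_eq_some _ _ hv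
    have hB : pvStepB g s = g.insert k (v.1, v.2 ++ [s]) := by rw [hstepB, hgetD]
    have hBitems : (pvStepB g s).items
        = g.items.map (fun p => if p.1 == k then (k, (v.1, v.2 ++ [s])) else p) := by
      rw [hB, PySem.Dict.items_insert_of_contains _ _ hgk]
    have hkeyeq : ∀ kv ∈ g.items, (kv.1 == k) = true → kv = (k, v) := by
      intro kv hkv hkb
      have h1 : kv.1 = k := by simpa using hkb
      have h2 : PySem.Dict.get? g kv.1 = some kv.2 :=
        PySem.Dict.get?_of_mem_items g (by exact hkv) hnd
      rw [h1, hv] at h2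
      have h3 : kv.2 = v := (Option.some.inj h2).symm
      calc kv = (kv.1, kv.2) := rfl
        _ = (k, v) := by rw [h1, h3]
    have hgetC : st.1.getD k 0 = (v.2.length : Int) := by
      rw [PySem.Dict.getD_eq_get?_getD, hcorrC, hv]; rfl
    have hcC : st.1.contains k = true := by rw [hcontC]; exact hgk
    have hcD : st.2.1.contains k = true := by rw [hcontD]; exact hgk
    refine ⟨?_, ?_, ?_, ?_⟩
    · rw [hB, PySem.Dict.keys_insert_of_contains _ _ hgk]; exact hnd
    · rw [pvStepA_fst, hk, PySem.Dict.items_insert_of_contains _ _ hcC, hc, hBitems, hgetC,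
          List.map_map, List.map_map]
      refine List.map_congr_left ?_
      intro kv hkv
      by_cases hkb : (kv.1 == k) = true
      · have heq := hkeyeq kv hkv hkb
        subst heq
        simp
      · have hkb' : kv.1 ≠ k := by simpa using hkb
        simp [hkb']
    · rw [pvStepA_disp, hk, PySem.Dict.setdefault_of_contains _ _ hcD, hd, hBitems, List.map_map]
      refine List.map_congr_left ?_
      intro kv hkv
      by_cases hkb : (kv.1 == k) = true
      · have heq := hkeyeq kv hkv hkb
        subst heq
        simp
      · have hkb' : kv.1 ≠ k := by simpa using hkb
        simp [hkb']
    · intro j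
      have hgj : (pvStepB g s).get? j = if j = k then some (v.1, v.2 ++ [s]) else g.get? j := by
        rw [hB]
        by_cases hj : j = k
        · subst hj; simp [PySem.Dict.get?_insert_self]
        · rw [PySem.Dict.get?_insert_of_ne _ _ hj, if_neg hj]
      rw [pvStepA_best, hk]
      by_cases hj : j = k
      · subst hj
        rw [hgj, if_pos rfl, pvBestUpd_get?_self]
        have hbst : pvBest (v.2 ++ [s]) = pvBStep (pvBest v.2) s := by
          simp [pvBest, List.foldl_append]
        simp only [Option.map_some, Option.getD_some, hbst]
        have hbk := hb j
        rw [hv] at hbk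
        simp only [Option.map_some, Option.getD_some] at hbk
        rw [hbk]
      · rw [hgj, if_neg hj, pvBestUpd_get?_ne _ _ _ _ hj]
        exact hb j
  · -- fresh key
    have hgk' : g.contains k = false := by simpa using hgk
    have hv : g.get? k = none := by
      rw [PySem.Dict.contains_eq_isSome_get?] at hgk'
      cases hg : g.get? k
      · rfl
      · rw [hg] at hgk'; simp at hgk'
    have hgetD : g.getD k (pvTheme s, []) = (pvTheme s, []) := PySem.Dict.getD_of_get?_eq_none _ _ hv
    have hB : pvStepB g s = g.insert k (pvTheme s, [s]) := by rw [hstepB, hgetD]; rfl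
    have hBitems : (pvStepB g s).items = g.items ++ [(k, (pvTheme s, [s]))] := by
      rw [hB, PySem.Dict.items_insert_of_not_contains _ _ hgk']
    have hcC : st.1.contains k = false := by rw [hcontC]; exact hgk'
    have hcD : st.2.1.contains k = false := by rw [hcontD]; exact hgk'
    have hgetC : st.1.getD k 0 = 0 := PySem.Dict.getD_of_not_contains _ _ hcC
    refine ⟨?_, ?_, ?_, ?_⟩
    · rw [hB, PySem.Dict.keys_insert_of_not_contains _ _ hgk']
      have hkn : k ∉ g.keys := fun hmem =>
        absurd ((PySem.Dict.contains_iff_mem_keys g k).2 hmem) (by simp [hgk'])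
      refine List.nodup_append.2 ⟨hnd, List.nodup_singleton _, by intro a ha b hbm hab; exact hkn ((hab.trans (List.mem_singleton.mp hbm)) ▸ ha)⟩
    · rw [pvStepA_fst, hk, PySem.Dict.items_insert_of_not_contains _ _ hcC, hc, hBitems, hgetC,
          List.map_append]
      rfl
    · rw [pvStepA_disp, hk, PySem.Dict.setdefault_of_not_contains _ _ hcD,
          PySem.Dict.items_insert_of_not_contains _ _ hcD, hd, hBitems, List.map_append]
      rfl
    · intro j
      have hgj : (pvStepB g s).get? j = if j = k then some (pvTheme s, [s]) else g.get? j := by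
        rw [hB]
        by_cases hj : j = k
        · subst hj; simp [PySem.Dict.get?_insert_self]
        · rw [PySem.Dict.get?_insert_of_ne _ _ hj, if_neg hj]
      rw [pvStepA_best, hk]
      by_cases hj : j = k
      · subst hj
        rw [hgj, if_pos rfl, pvBestUpd_get?_self]
        have hbk := hb j
        rw [hv] at hbk
        have hbk' : st.2.2.get? j = none := by rw [hbk]; rfl
        rw [hbk']
        simp only [Option.map_some, Option.getD_some]
        rfl
      · rw [hgj, if_neg hj, pvBestUpd_get?_ne _ _ _ _ hj]
        exact hb j

theorem pvInv_foldl (l : List pvSetT) (st : pvStA) (g : pvG) (h : pvInv st g) :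
    pvInv (l.foldl pvStepA st) (l.foldl pvStepB g) := by
  induction l generalizing st g with
  | nil => exact h
  | cons x xs ih => exact ih _ _ (pvInv_step st g x h)

theorem pvInv_init : pvInv (PySem.Dict.empty, PySem.Dict.empty, PySem.Dict.empty) PySem.Dict.empty := by
  refine ⟨List.nodup_nil, rfl, rfl, fun k => rfl⟩

-- the no-image-test best step, and the relation of A's strict-> running best to Python max()
def pvBStepNT (prev : Option (Int × String)) (s : pvSetT) : Option (Int × String) :=
  match prev with
  | none => some (pvPieces s, pvImgV s)
  | some p => if p.1 < pvPieces s then some (pvPieces s, pvImgV s) else prev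

theorem pvBest_filter (ms : List pvSetT) :
    pvBest ms = (ms.filter (fun s => pvImgOk s)).foldl pvBStepNT none := by
  rw [← PySem.List.foldl_if_eq_foldl_filter (fun s => pvImgOk s) pvBStepNT ms none]
  unfold pvBest
  apply PySem.List.foldl_congr_mem
  intro acc x _
  unfold pvBStep pvBStepNT
  by_cases himg : pvImgOk x = true
  · simp [himg]
  · simp [himg]

def pvMaxStep (acc : Option pvSetT) (x : pvSetT) : Option pvSetT :=
  match acc with
  | none => some x
  | some m => if pvPieces m < pvPieces x then some x else some m

theorem pvNT_map (l : List pvSetT) (acc : Option pvSetT) :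
    l.foldl pvBStepNT (acc.map (fun b => (pvPieces b, pvImgV b)))
      = (l.foldl pvMaxStep acc).map (fun b => (pvPieces b, pvImgV b)) := by
  induction l generalizing acc with
  | nil => rfl
  | cons x xs ih =>
    rw [List.foldl_cons, List.foldl_cons, ← ih]
    congr 1
    cases acc with
    | none => rfl
    | some m =>
      show pvBStepNT (some (pvPieces m, pvImgV m)) x
        = (if pvPieces m < pvPieces x then some x else some m).map (fun b => (pvPieces b, pvImgV b))
      unfold pvBStepNT
      by_cases hlt : pvPieces m < pvPieces x
      · simp [hlt]
      · simp [hlt]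

theorem pvBest_eq_max (ms : List pvSetT) :
    (pvBest ms).map (·.2)
      = (match PySem.List.max? (ms.filter (fun s => pvTruthy (pvGet s "image_url")))
            (fun s => (pvIntOr0 (pvGet s "pieces")).getD 0) with
         | some b => pvGet b "image_url"
         | none => none) := by
  have hfe : (fun s : pvSetT => pvTruthy (pvGet s "image_url")) = fun s => pvImgOk s := rfl
  have hke : (fun s : pvSetT => (pvIntOr0 (pvGet s "pieces")).getD 0) = pvPieces := rfl
  rw [hfe, hke]
  have hmaxdef : PySem.List.max? (ms.filter (fun s => pvImgOk s)) pvPieces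
      = (ms.filter (fun s => pvImgOk s)).foldl pvMaxStep none := by
    unfold PySem.List.max?
    apply PySem.List.foldl_congr_mem
    intro acc x _
    cases acc <;> rfl
  rw [pvBest_filter, hmaxdef]
  have := pvNT_map (ms.filter (fun s => pvImgOk s)) none
  rw [show (none : Option pvSetT).map (fun b => (pvPieces b, pvImgV b)) = none from rfl] at this
  rw [this]
  cases hm : (ms.filter (fun s => pvImgOk s)).foldl pvMaxStep none with
  | none => rfl
  | some b =>
    have hbmem : b ∈ ms.filter (fun s => pvImgOk s) := by
      have : PySem.List.max? (ms.filter (fun s => pvImgOk s)) pvPieces = some b := by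
        rw [hmaxdef, hm]
      exact PySem.List.max?_mem this
    have himg : pvImgOk b = true := (List.mem_filter.mp hbmem).2
    have : pvGet b "image_url" = some (pvImgV b) := by
      unfold pvImgOk pvTruthy at himg
      unfold pvImgV
      cases hg : pvGet b "image_url" with
      | none => rw [hg] at himg; simp at himg
      | some t => rfl
    simp [this]

theorem pvRows_eq (st : pvStA) (g : pvG) (h : pvInv st g) :
    st.1.keys.map (fun k => (st.2.1.getD k "", st.1.getD k 0, (st.2.2.get? k).map (·.2)))
      = g.items.map (fun kv =>
          (kv.2.1, (kv.2.2.length : Int),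
            match PySem.List.max? (kv.2.2.filter (fun s => pvTruthy (pvGet s "image_url")))
                (fun s => (pvIntOr0 (pvGet s "pieces")).getD 0) with
            | some b => pvGet b "image_url"
            | none => none)) := by
  obtain ⟨hnd, hc, hd, hb⟩ := h
  have hkeys : st.1.keys = g.items.map (·.1) := by
    show st.1.items.map (·.1) = _
    rw [hc, List.map_map]
    rfl
  rw [hkeys, List.map_map]
  apply List.map_congr_left
  intro kv hkv
  have hget : g.get? kv.1 = some kv.2 := PySem.Dict.get?_of_mem_items g (by exact hkv) hnd
  have h1 : st.2.1.getD kv.1 "" = kv.2.1 := by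
    rw [PySem.Dict.getD_eq_get?_getD, pv_corr st.2.1 g (fun v => v.1) hd, hget]; rfl
  have h2 : st.1.getD kv.1 0 = (kv.2.2.length : Int) := by
    rw [PySem.Dict.getD_eq_get?_getD, pv_corr st.1 g (fun v => (v.2.length : Int)) hc, hget]; rfl
  have h3 : st.2.2.get? kv.1 = pvBest kv.2.2 := by
    rw [hb kv.1, hget]; rfl
  show (st.2.1.getD kv.1 "", st.1.getD kv.1 0, (st.2.2.get? kv.1).map (·.2)) = _
  rw [h1, h2, h3, pvBest_eq_max]

theorem pvBodyA (ql : String) (my : Option Int) (st : pvStA) (s : pvSetT) :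
    (let theme := PySem.Str.strip ((pvGet s "theme").getD "")
     if theme == "" then st
     else
       let yearOk := match my with
         | none => true
         | some m => match pvIntOr0 (pvGet s "year") with
           | none => false
           | some y => !decide (y < m)
       if !yearOk then st
       else
         let k := pvNormLower theme
         if ql != "" && !(PySem.Str.isIn ql k) then st
         else
           let counts' := st.1.insert k (st.1.getD k 0 + 1)
           let display' := st.2.1.setdefault k theme
           let img := pvGet s "image_url"
           if pvTruthy img then
             let pieces := (pvIntOr0 (pvGet s "pieces")).getD 0
             let best' := match st.2.2.get? k with
               | none => st.2.2.insert k (pieces, img.getD "")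
               | some prev => if prev.1 < pieces then st.2.2.insert k (pieces, img.getD "") else st.2.2
             (counts', display', best')
           else (counts', display', st.2.2))
    = if pvKeep s ql my = true then pvStepA st s else st := by
  by_cases h1 : (PySem.Str.strip ((pvGet s "theme").getD "") == "") = true
  · simp [pvKeep, h1]
  · by_cases h2 : (match my with
      | none => true
      | some m => match pvIntOr0 (pvGet s "year") with
        | none => false
        | some y => !decide (y < m)) = true
    · by_cases h3 : (ql != "" && !(PySem.Str.isIn ql (pvNormLower (PySem.Str.strip ((pvGet s "theme").getD ""))))) = true
      · obtain ⟨hq, hin⟩ : (¬ql = "") ∧ PySem.Chars.isIn ql.toList (pvNormLower (PySem.Str.strip ((pvGet s "theme").getD ""))).toList = false := by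
          simpa using h3
        simp [pvKeep, h1, h2, hq, hin]
      · by_cases h4 : pvTruthy (pvGet s "image_url") = true
        · simp only [pvKeep, pvStepA, pvBestUpd, pvKey, pvTheme, pvPieces, pvImgV, pvImgOk]
          simp [h1, h2, h4]
          by_cases hq : ql = ""
          · simp [hq]
          · have himp : ¬ql = "" → PySem.Chars.isIn ql.toList (pvNormLower (PySem.Str.strip ((pvGet s "theme").getD ""))).toList = true := by
              simpa using h3
            simp [hq, himp hq]
        · simp only [pvKeep, pvStepA, pvBestUpd, pvKey, pvTheme, pvPieces, pvImgV, pvImgOk]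
          simp [h1, h2, h4]
          by_cases hq : ql = ""
          · simp [hq]
          · have himp : ¬ql = "" → PySem.Chars.isIn ql.toList (pvNormLower (PySem.Str.strip ((pvGet s "theme").getD ""))).toList = true := by
              simpa using h3
            simp [hq, himp hq]
    · simp [pvKeep, h1, h2]

theorem pvBodyB (ql : String) (my : Option Int) (g : pvG) (s : pvSetT) :
    (let theme := PySem.Str.strip ((pvGet s "theme").getD "")
     if theme == "" then g
     else
       let yearOk := match my with
         | none => true
         | some m => match pvIntOr0 (pvGet s "year") with
           | none => false
           | some y => !decide (y < m)
       if !yearOk then g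
       else
         let k := pvNormLower theme
         if ql != "" && !(PySem.Str.isIn ql k) then g
         else
           g.modify k (theme, []) (fun p => (p.1, p.2 ++ [s])))
    = if pvKeep s ql my = true then pvStepB g s else g := by
  by_cases h1 : (PySem.Str.strip ((pvGet s "theme").getD "") == "") = true
  · simp [pvKeep, h1]
  · by_cases h2 : (match my with
      | none => true
      | some m => match pvIntOr0 (pvGet s "year") with
        | none => false
        | some y => !decide (y < m)) = true
    · by_cases h3 : (ql != "" && !(PySem.Str.isIn ql (pvNormLower (PySem.Str.strip ((pvGet s "theme").getD ""))))) = true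
      · obtain ⟨hq, hin⟩ : (¬ql = "") ∧ PySem.Chars.isIn ql.toList (pvNormLower (PySem.Str.strip ((pvGet s "theme").getD ""))).toList = false := by
          simpa using h3
        simp [pvKeep, h1, h2, hq, hin]
      · simp only [pvKeep, pvStepB, pvKey, pvTheme]
        simp [h1, h2]
        by_cases hq : ql = ""
        · simp [hq]
        · have himp : ¬ql = "" → PySem.Chars.isIn ql.toList (pvNormLower (PySem.Str.strip ((pvGet s "theme").getD ""))).toList = true := by
            simpa using h3
          simp [hq, himp hq]
    · simp [pvKeep, h1, h2]

theorem pv_main (all_sets : List pvSetT) (q : String) (my : Option Int) :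
    set_count_by_theme_py all_sets q my = set_count_by_theme_py_alt all_sets q my := by
  simp only [set_count_by_theme_py, set_count_by_theme_py_alt]
  rw [PySem.List.foldl_congr_mem _ _ _ _ (fun acc x _ => pvBodyA (pvNormLower q) my acc x),
      PySem.List.foldl_congr_mem _ _ _ _ (fun acc x _ => pvBodyB (pvNormLower q) my acc x),
      PySem.List.foldl_if_eq_foldl_filter (fun s => pvKeep s (pvNormLower q) my) pvStepA,
      PySem.List.foldl_if_eq_foldl_filter (fun s => pvKeep s (pvNormLower q) my) pvStepB]
  rw [pvRows_eq _ _ (pvInv_foldl (all_sets.filter (fun s => pvKeep s (pvNormLower q) my)) _ _ pvInv_init)]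

-- ===== VERDICT (by name: the statement is the Claim_ definition above) =====
theorem set_count_by_theme_py_spec : Claim_equal_set_count_by_theme_py := by
  intro all_sets q min_year _ _
  unfold Spec_set_count_by_theme_py
  exact pv_main all_sets q min_year
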